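-- pv_equiv track=rewrite | github.com/kanishkhaa/codher | ml_model/App.py | build_medication_cache
-- ===== SOURCE A (Python) =====
-- def build_medication_cache(medications):
--     cache = {}
--     for med in medications:
--         med_name = med.get('name', '').lower()
--         description = med.get('description', 'Unknown').lower()
--         if not description or description == 'unknown':
--             med_type = 'Others'
--         elif 'antibiotic' in description:
--             med_type = 'Antibiotics'
--         elif 'pain' in description or 'nsaid' in description:
--             med_type = 'Painkillers'
--         elif any(keyword in description for keyword in ['cardio', 'blood pressure', 'heart', 'ace inhibitor']):
--             med_type = 'Cardiovascular'
--         elif any(keyword in description for keyword in ['neuro', 'brain']):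
--             med_type = 'Neurological'
--         elif any(keyword in description for keyword in ['hormon', 'diabetes', 'biguanide']):
--             med_type = 'Hormonal'
--         elif any(keyword in description for keyword in ['cholesterol', 'statin']):
--             med_type = 'Cholesterol'
--         else:
--             med_type = 'Others'
--         cache[med_name] = {
--             'name': med.get('name', 'Unknown'),
--             'description': med.get('description', 'Unknown'),
--             'type': med_type
--         }
--     return cache
-- ===== SOURCE B (Python) =====
-- KEYWORD_RANKS = [
--     ("antibiotic", 0, "Antibiotics"),
--     ("pain", 1, "Painkillers"),
--     ("nsaid", 1, "Painkillers"),
--     ("cardio", 2, "Cardiovascular"),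
--     ("blood pressure", 2, "Cardiovascular"),
--     ("heart", 2, "Cardiovascular"),
--     ("ace inhibitor", 2, "Cardiovascular"),
--     ("neuro", 3, "Neurological"),
--     ("brain", 3, "Neurological"),
--     ("hormon", 4, "Hormonal"),
--     ("diabetes", 4, "Hormonal"),
--     ("biguanide", 4, "Hormonal"),
--     ("cholesterol", 5, "Cholesterol"),
--     ("statin", 5, "Cholesterol"),
-- ]
--
--
-- def classify(description):
--     # Score every keyword that occurs and keep the best (lowest) rank seen.
--     if not description or description == "unknown":
--         return "Others"
--     best = None
--     for keyword, rank, label in KEYWORD_RANKS: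
--         if keyword in description:
--             if best is None or rank < best[0]:
--                 best = (rank, label)
--     return "Others" if best is None else best[1]
--
--
-- def build_medication_cache(medications):
--     # Stage 1: compute the key/record pairs; stage 2: collapse them into a dict.
--     entries = []
--     for med in medications:
--         name = med.get("name", "Unknown")
--         description = med.get("description", "Unknown")
--         entries.append((med.get("name", "").lower(),
--                         {"name": name,
--                          "description": description,
--                          "type": classify(description.lower())}))
--     cache = {}
--     for key, value in entries:
--         cache[key] = value
--     return cache
-- ===== Notes on version B (the rewrite author's own statement) =====
-- stated objective: alternative
-- what changed: Classification now scans a flat ranked keyword table and keeps the lowest-rank (best) matching keyword instead of A's first-match if/elif chain, and the cache is built in two staged passes (an entries list, then a dict collapse) instead of A's single fold.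
import Mathlib
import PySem

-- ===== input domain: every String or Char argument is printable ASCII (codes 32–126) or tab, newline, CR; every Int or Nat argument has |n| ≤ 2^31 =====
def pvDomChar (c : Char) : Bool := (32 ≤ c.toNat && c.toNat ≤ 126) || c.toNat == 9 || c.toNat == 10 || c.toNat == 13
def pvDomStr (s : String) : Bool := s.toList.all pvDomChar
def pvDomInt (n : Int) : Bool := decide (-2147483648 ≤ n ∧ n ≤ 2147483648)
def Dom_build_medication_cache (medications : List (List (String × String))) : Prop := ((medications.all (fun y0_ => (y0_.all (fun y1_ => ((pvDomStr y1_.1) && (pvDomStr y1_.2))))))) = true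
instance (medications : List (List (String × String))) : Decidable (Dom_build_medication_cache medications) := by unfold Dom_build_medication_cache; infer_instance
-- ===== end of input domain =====

-- B scores every keyword occurrence against a ranked keyword table and keeps the best
-- (lowest) rank instead of A's first-match elif chain, and builds the cache in two
-- staged passes (entries list, then dict); objective: alternative decomposition,
-- same return value everywhere.

-- ===== PORT A =====
def build_medication_cache (medications : List (List (String × String))) : List (String × List (String × String)) :=
  (medications.foldl (fun (cache : PySem.Dict String (List (String × String))) med =>
    let d := PySem.Dict.mk med
    let med_name := PySem.Str.lower (d.getD "name" "")
    let description := PySem.Str.lower (d.getD "description" "Unknown")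
    let med_type :=
      if description == "" || description == "unknown" then "Others"
      else if PySem.Str.isIn "antibiotic" description then "Antibiotics"
      else if PySem.Str.isIn "pain" description || PySem.Str.isIn "nsaid" description then "Painkillers"
      else if (["cardio", "blood pressure", "heart", "ace inhibitor"] : List String).any (fun k => PySem.Str.isIn k description) then "Cardiovascular"
      else if (["neuro", "brain"] : List String).any (fun k => PySem.Str.isIn k description) then "Neurological"
      else if (["hormon", "diabetes", "biguanide"] : List String).any (fun k => PySem.Str.isIn k description) then "Hormonal"
      else if (["cholesterol", "statin"] : List String).any (fun k => PySem.Str.isIn k description) then "Cholesterol"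
      else "Others"
    cache.insert med_name
      [("name", d.getD "name" "Unknown"), ("description", d.getD "description" "Unknown"), ("type", med_type)])
    PySem.Dict.empty).items

-- ===== PORT B =====
def pvKeywordRanks : List (String × Int × String) :=
  [ ("antibiotic", 0, "Antibiotics")
  , ("pain", 1, "Painkillers")
  , ("nsaid", 1, "Painkillers")
  , ("cardio", 2, "Cardiovascular")
  , ("blood pressure", 2, "Cardiovascular")
  , ("heart", 2, "Cardiovascular")
  , ("ace inhibitor", 2, "Cardiovascular")
  , ("neuro", 3, "Neurological")
  , ("brain", 3, "Neurological")
  , ("hormon", 4, "Hormonal")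
  , ("diabetes", 4, "Hormonal")
  , ("biguanide", 4, "Hormonal")
  , ("cholesterol", 5, "Cholesterol")
  , ("statin", 5, "Cholesterol") ]

-- one loop step of classify's best-rank scan
def pvStep (description : String) (best : Option (Int × String)) (e : String × Int × String) : Option (Int × String) :=
  if PySem.Str.isIn e.1 description then
    match best with
    | none => some e.2
    | some q => if e.2.1 < q.1 then some e.2 else some q
  else best

def pvClassify (description : String) : String :=
  if description == "" || description == "unknown" then "Others"
  else
    match pvKeywordRanks.foldl (pvStep description) none with
    | none => "Others"
    | some best => best.2

def build_medication_cache_alt (medications : List (List (String × String))) : List (String × List (String × String)) :=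
  let entries := medications.foldl (fun (acc : List (String × List (String × String))) med =>
    let d := PySem.Dict.mk med
    let name := d.getD "name" "Unknown"
    let description := d.getD "description" "Unknown"
    acc ++ [(PySem.Str.lower (d.getD "name" ""),
             [("name", name), ("description", description), ("type", pvClassify (PySem.Str.lower description))])]) []
  (entries.foldl (fun (cache : PySem.Dict String (List (String × String))) kv => cache.insert kv.1 kv.2)
    PySem.Dict.empty).items

-- ===== PRECONDITION & SPEC =====
def Spec_build_medication_cache (medications : List (List (String × String))) (out : List (String × List (String × String))) : Prop := out = build_medication_cache_alt medications
instance (medications : List (List (String × String))) (out : List (String × List (String × String))) : Decidable (Spec_build_medication_cache medications out) := by unfold Spec_build_medication_cache; infer_instance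

-- ===== CLAIM (what is proved, stated in full; the proofs are below) =====
def Claim_equal_build_medication_cache : Prop := ∀ (medications : List (List (String × String))), Dom_build_medication_cache medications → Spec_build_medication_cache medications (build_medication_cache medications)

-- ===== LEMMAS AND PROOFS =====

theorem pvFind?_cons_if {α : Type} (p : α → Bool) (a : α) (l : List α) :
    (a :: l).find? p = if p a then some a else l.find? p := by
  cases hpa : p a <;> simp [hpa]

-- once the best is at most every remaining rank, the scan keeps it
theorem pvFold_pres (d : String) (l : List (String × Int × String)) (p : Int × String)
    (h : ∀ e ∈ l, p.1 ≤ e.2.1) :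
    l.foldl (pvStep d) (some p) = some p := by
  induction l with
  | nil => rfl
  | cons e t ih =>
    have he : p.1 ≤ e.2.1 := h e (by simp)
    have hs : pvStep d (some p) e = some p := by
      unfold pvStep
      by_cases h1 : PySem.Str.isIn e.1 d = true
      · rw [if_pos h1]
        show (if e.2.1 < p.1 then some e.2 else some p) = some p
        rw [if_neg (by omega)]
      · rw [if_neg h1]
    rw [List.foldl_cons, hs]
    exact ih (fun e' he' => h e' (by simp [he']))

-- over a rank-nondecreasing table, the best-rank scan is the first match
theorem pvFold_find (d : String) (l : List (String × Int × String))
    (h : l.Pairwise (fun a b => a.2.1 ≤ b.2.1)) :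
    l.foldl (pvStep d) none = (l.find? (fun e => PySem.Str.isIn e.1 d)).map (·.2) := by
  induction l with
  | nil => rfl
  | cons e t ih =>
    rcases List.pairwise_cons.mp h with ⟨he, ht⟩
    rw [List.foldl_cons, pvFind?_cons_if]
    by_cases hi : PySem.Str.isIn e.1 d = true
    · have hs : pvStep d none e = some e.2 := by unfold pvStep; rw [if_pos hi]
      rw [hs, pvFold_pres d t e.2 he, if_pos hi]
      rfl
    · have hs : pvStep d none e = none := by unfold pvStep; rw [if_neg hi]
      rw [hs, ih ht, if_neg hi]

set_option maxHeartbeats 1000000 in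
theorem pvClassify_eq (d : String) :
    pvClassify d =
      (if d == "" || d == "unknown" then "Others"
       else if PySem.Str.isIn "antibiotic" d then "Antibiotics"
       else if PySem.Str.isIn "pain" d || PySem.Str.isIn "nsaid" d then "Painkillers"
       else if (["cardio", "blood pressure", "heart", "ace inhibitor"] : List String).any (fun k => PySem.Str.isIn k d) then "Cardiovascular"
       else if (["neuro", "brain"] : List String).any (fun k => PySem.Str.isIn k d) then "Neurological"
       else if (["hormon", "diabetes", "biguanide"] : List String).any (fun k => PySem.Str.isIn k d) then "Hormonal"
       else if (["cholesterol", "statin"] : List String).any (fun k => PySem.Str.isIn k d) then "Cholesterol"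
       else "Others") := by
  unfold pvClassify
  rw [pvFold_find d pvKeywordRanks (by decide)]
  simp only [pvKeywordRanks, pvFind?_cons_if, List.find?_nil]
  by_cases hg : (d == "" || d == "unknown") = true
  · simp only [if_pos hg]
  · simp only [if_neg hg]
    by_cases h0 : PySem.Str.isIn "antibiotic" d = true
    · simp only [if_pos h0, Option.map_some]
    · simp only [if_neg h0]
      by_cases h1 : PySem.Str.isIn "pain" d = true
      · simp only [if_pos h1, Option.map_some] ; simp_all
      · simp only [if_neg h1]
        by_cases h2 : PySem.Str.isIn "nsaid" d = true
        · simp only [if_pos h2, Option.map_some] ; simp_all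
        · simp only [if_neg h2]
          by_cases h3 : PySem.Str.isIn "cardio" d = true
          · simp only [if_pos h3, Option.map_some] ; simp_all
          · simp only [if_neg h3]
            by_cases h4 : PySem.Str.isIn "blood pressure" d = true
            · simp only [if_pos h4, Option.map_some] ; simp_all
            · simp only [if_neg h4]
              by_cases h5 : PySem.Str.isIn "heart" d = true
              · simp only [if_pos h5, Option.map_some] ; simp_all
              · simp only [if_neg h5]
                by_cases h6 : PySem.Str.isIn "ace inhibitor" d = true
                · simp only [if_pos h6, Option.map_some] ; simp_all
                · simp only [if_neg h6]
                  by_cases h7 : PySem.Str.isIn "neuro" d = true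
                  · simp only [if_pos h7, Option.map_some] ; simp_all
                  · simp only [if_neg h7]
                    by_cases h8 : PySem.Str.isIn "brain" d = true
                    · simp only [if_pos h8, Option.map_some] ; simp_all
                    · simp only [if_neg h8]
                      by_cases h9 : PySem.Str.isIn "hormon" d = true
                      · simp only [if_pos h9, Option.map_some] ; simp_all
                      · simp only [if_neg h9]
                        by_cases h10 : PySem.Str.isIn "diabetes" d = true
                        · simp only [if_pos h10, Option.map_some] ; simp_all
                        · simp only [if_neg h10]
                          by_cases h11 : PySem.Str.isIn "biguanide" d = true
                          · simp only [if_pos h11, Option.map_some] ; simp_all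
                          · simp only [if_neg h11]
                            by_cases h12 : PySem.Str.isIn "cholesterol" d = true
                            · simp only [if_pos h12, Option.map_some] ; simp_all
                            · simp only [if_neg h12]
                              by_cases h13 : PySem.Str.isIn "statin" d = true
                              · simp only [if_pos h13, Option.map_some] ; simp_all
                              · simp only [if_neg h13]
                                simp_all

-- folding with append builds the mapped list
theorem pvEntries_eq {α β : Type} (g : α → β) (l : List α) (init : List β) :
    l.foldl (fun acc x => acc ++ [g x]) init = init ++ l.map g := by
  induction l generalizing init with
  | nil => simp
  | cons x t ih => simp [ih]

-- ===== VERDICT (by name: the statement is the Claim_ definition above) =====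
theorem build_medication_cache_spec : Claim_equal_build_medication_cache := by
  intro medications _
  unfold Spec_build_medication_cache build_medication_cache build_medication_cache_alt
  simp only [pvEntries_eq, List.nil_append, List.foldl_map, pvClassify_eq]
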